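-- pv_equiv track=rewrite | github.com/acegiansal/NHL-Player-Comparison | PlayerTracker.py | compare_stat
-- ===== SOURCE A (Python) =====
-- def compare_stat(stats: list, index: int) -> str:
--     COLOUR = {'high': 'green', 'mid': 'blue', 'low': 'red'}
--     for p in stats:
--         if type(p) != int:
--             return ('grey')
--     if stats[0] == stats[1] and stats[1] == stats[2]:
--         return(COLOUR['mid'])
--     elif stats.count(stats[index]) > 1:
--         return(COLOUR['mid'])
--     elif stats[index] == max(stats):
--         return(COLOUR['high'])
--     elif stats[index] != max(stats) and stats[index] != min(stats):
--         return(COLOUR['mid'])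
--     else:
--         return(COLOUR['low'])
-- ===== SOURCE B (Python) =====
-- def compare_stat(stats: list, index: int) -> str:
--     COLOUR = {'high': 'green', 'mid': 'blue', 'low': 'red'}
--     for p in stats:
--         if type(p) != int:
--             return COLOUR.get('bad', 'grey')
--     if stats[0] == stats[1] == stats[2]:
--         return COLOUR['mid']
--     v = stats[index]
--     order = sorted(stats)
--     i = order.index(v)
--     if i + 1 < len(order) and order[i + 1] == v:
--         return COLOUR['mid']           # v occurs more than once
--     if i == len(order) - 1:
--         return COLOUR['high']          # v sits at the top of the sorted order
--     if i == 0: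
--         return COLOUR['low']           # v sits at the bottom
--     return COLOUR['mid']
-- ===== Notes on version B (the rewrite author's own statement) =====
-- stated objective: alternative
-- what changed: B sorts the stats and classifies v by the position of its first occurrence in the sorted order (adjacent duplicate -> blue, last -> green, first -> red, interior -> blue), replacing A's count/max/min comparison cascade by a sort-then-rank lookup.
import Mathlib
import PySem

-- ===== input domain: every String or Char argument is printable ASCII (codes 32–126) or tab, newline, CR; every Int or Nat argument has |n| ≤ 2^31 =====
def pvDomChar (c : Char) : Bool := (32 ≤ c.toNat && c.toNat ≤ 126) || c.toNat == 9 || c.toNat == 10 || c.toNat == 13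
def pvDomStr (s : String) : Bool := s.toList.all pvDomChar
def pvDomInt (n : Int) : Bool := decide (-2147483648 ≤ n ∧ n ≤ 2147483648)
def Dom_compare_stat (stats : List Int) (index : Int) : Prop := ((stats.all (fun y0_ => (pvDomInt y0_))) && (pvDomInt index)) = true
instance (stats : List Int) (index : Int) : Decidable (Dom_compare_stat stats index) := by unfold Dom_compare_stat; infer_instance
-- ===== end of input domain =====

-- B replaces A's count/max/min cascade by sort-then-rank (an alternative of similar cost); equivalence is about the return value only.

-- ===== PORT A =====
def compare_stat (stats : List Int) (index : Int) : String :=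
  -- 'for p in stats: if type(p) != int: return grey' — the element type is Int, so the test is always false
  if stats.any (fun _ => false) then "grey"
  else if PySem.List.pyGetD stats 0 0 = PySem.List.pyGetD stats 1 0 ∧
          PySem.List.pyGetD stats 1 0 = PySem.List.pyGetD stats 2 0 then "blue"
  else if 1 < PySem.List.count stats (PySem.List.pyGetD stats index 0) then "blue"
  else if PySem.List.pyGetD stats index 0 = (PySem.List.max? stats (fun y => y)).getD 0 then "green"
  else if PySem.List.pyGetD stats index 0 ≠ (PySem.List.max? stats (fun y => y)).getD 0 ∧
          PySem.List.pyGetD stats index 0 ≠ (PySem.List.min? stats (fun y => y)).getD 0 then "blue"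
  else "red"

-- ===== PORT B =====
def compare_stat_alt (stats : List Int) (index : Int) : String :=
  -- 'for p in stats: if type(p) != int: return grey' — always false for Int elements
  if stats.any (fun _ => false) then "grey"
  else if PySem.List.pyGetD stats 0 0 = PySem.List.pyGetD stats 1 0 ∧
          PySem.List.pyGetD stats 1 0 = PySem.List.pyGetD stats 2 0 then "blue"
  else
    let v := PySem.List.pyGetD stats index 0
    let order := PySem.List.sorted stats (fun y => y)
    -- order.index(v); the default is unreachable on Pre_ (v ∈ order there)
    let i := (PySem.List.index? order v).getD 0
    if i + 1 < order.length ∧ PySem.List.pyGetD order ((i : Int) + 1) 0 = v then "blue"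
    else if i = order.length - 1 then "green"
    else if i = 0 then "red"
    else "blue"

-- ===== PRECONDITION & SPEC =====
-- Pre_ admits exactly the inputs on which A returns: it excludes inputs where A raises
-- IndexError — lists of length < 2 (stats[0]/stats[1]), length-2 lists whose two elements are
-- equal (the 'and' then reaches stats[2]), and an index outside Python's valid range for stats
-- unless the first three stats are equal, where A returns before touching stats[index].
def Pre_compare_stat (stats : List Int) (index : Int) : Prop :=
  (2 ≤ stats.length ∧ PySem.List.pyGetD stats 0 0 ≠ PySem.List.pyGetD stats 1 0 ∧
     PySem.Raise.InRange stats.length index) ∨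
  (3 ≤ stats.length ∧
    (PySem.Raise.InRange stats.length index ∨
      (PySem.List.pyGetD stats 0 0 = PySem.List.pyGetD stats 1 0 ∧
       PySem.List.pyGetD stats 1 0 = PySem.List.pyGetD stats 2 0)))
instance (stats : List Int) (index : Int) : Decidable (Pre_compare_stat stats index) := by unfold Pre_compare_stat; infer_instance
def pvWitness_compare_stat : List Int × Int := ([1, 2, 3], 1)

def Spec_compare_stat (stats : List Int) (index : Int) (out : String) : Prop := out = compare_stat_alt stats index
instance (stats : List Int) (index : Int) (out : String) : Decidable (Spec_compare_stat stats index out) := by unfold Spec_compare_stat; infer_instance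

-- ===== CLAIM (what is proved, stated in full; the proofs are below) =====
def Claim_equal_compare_stat : Prop := ∀ (stats : List Int) (index : Int), Dom_compare_stat stats index → Pre_compare_stat stats index → Spec_compare_stat stats index (compare_stat stats index)

-- ===== LEMMAS AND PROOFS =====

-- the first maximum's value equals v iff v bounds the list above
theorem pv_max_getD_eq {stats : List Int} {v : Int} (hv : v ∈ stats) :
    (v = (PySem.List.max? stats (fun y => y)).getD 0) ↔ ∀ s ∈ stats, s ≤ v := by
  cases h : PySem.List.max? stats (fun y => y) with
  | none =>
      exact absurd ((PySem.List.max?_eq_none_iff _ _).mp h ▸ hv) (List.not_mem_nil)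
  | some m =>
      have hmx := PySem.List.max?_isMax h
      have hmem := PySem.List.max?_mem h
      simp only [Option.getD_some]
      constructor
      · rintro rfl; exact hmx
      · intro hall; exact le_antisymm (hmx v hv) (hall m hmem)

theorem pv_min_getD_eq {stats : List Int} {v : Int} (hv : v ∈ stats) :
    (v = (PySem.List.min? stats (fun y => y)).getD 0) ↔ ∀ s ∈ stats, v ≤ s := by
  cases h : PySem.List.min? stats (fun y => y) with
  | none =>
      exact absurd ((PySem.List.min?_eq_none_iff _ _).mp h ▸ hv) (List.not_mem_nil)
  | some m =>
      have hmn := PySem.List.min?_isMin h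
      have hmem := PySem.List.min?_mem h
      simp only [Option.getD_some]
      constructor
      · rintro rfl; exact hmn
      · intro hall; exact le_antisymm (hall m hmem) (hmn v hv)

theorem compare_stat_eq_alt (stats : List Int) (index : Int)
    (hpre : Pre_compare_stat stats index) :
    compare_stat stats index = compare_stat_alt stats index := by
  unfold compare_stat compare_stat_alt
  have hfalse : ¬ ((stats.any fun _ => false) = true) := by simp
  rw [if_neg hfalse, if_neg hfalse]
  dsimp only
  by_cases hc1 : (PySem.List.pyGetD stats 0 0 = PySem.List.pyGetD stats 1 0 ∧
      PySem.List.pyGetD stats 1 0 = PySem.List.pyGetD stats 2 0)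
  · rw [if_pos hc1, if_pos hc1]
  rw [if_neg hc1, if_neg hc1]
  have hidx : PySem.Raise.InRange stats.length index := by
    rcases hpre with ⟨-, -, h⟩ | ⟨-, h⟩
    · exact h
    · exact h.resolve_right hc1
  have hlen2 : 2 ≤ stats.length := by
    rcases hpre with ⟨h, -, -⟩ | ⟨h, -⟩
    · exact h
    · omega
  set v := PySem.List.pyGetD stats index 0 with hv
  have hvmem : v ∈ stats := PySem.List.pyGetD_mem stats 0 hidx
  set order := PySem.List.sorted stats (fun y => y) with horder
  have hperm : order.Perm stats := PySem.List.sorted_perm stats (fun y => y) false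
  have hvord : v ∈ order := (PySem.List.mem_sorted stats (fun y => y) false v).mpr hvmem
  -- decompose the sorted list around v's first occurrence
  obtain ⟨i, hi⟩ := Option.isSome_iff_exists.mp
    ((PySem.List.index?_isSome_iff (xs := order) (v := v)).mpr hvord)
  obtain ⟨pre, suf, hsplit, hplen, hvpre⟩ := (PySem.List.index?_eq_some_iff order v i).mp hi
  rw [hi]
  simp only [Option.getD_some]
  have hlen : order.length = pre.length + 1 + suf.length := by
    rw [hsplit]; simp; omega
  have hpw : order.Pairwise (fun a b => a ≤ b) := PySem.List.sorted_pairwise stats (fun y => y)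
  rw [hsplit] at hpw
  have hpw' := hpw
  rw [List.pairwise_append] at hpw'
  obtain ⟨hpwpre, hpwvs, hcross⟩ := hpw'
  rw [List.pairwise_cons] at hpwvs
  obtain ⟨hvle, hpwsuf⟩ := hpwvs
  -- counts through the permutation
  have hcnt : PySem.List.count stats v = 1 + suf.count v := by
    rw [PySem.List.count_eq, ← hperm.count_eq, hsplit]
    simp [List.count_append, List.count_eq_zero_of_not_mem hvpre]
    omega
  -- the duplicate tests agree: order[i+1] = v (with i+1 < len) ↔ count v > 1 ↔ v ∈ suf
  have hget : PySem.List.pyGetD order ((i : Int) + 1) 0 = order.getD (i + 1) 0 := by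
    have : ((i : Int) + 1) = ((i + 1 : Nat) : Int) := by push_cast; ring
    rw [this, PySem.List.pyGetD_natCast]
  have hdup : (i + 1 < order.length ∧ PySem.List.pyGetD order ((i : Int) + 1) 0 = v)
      ↔ v ∈ suf := by
    constructor
    · rintro ⟨hlt, hvv⟩
      rw [hget] at hvv
      cases suf with
      | nil => simp at hlen; omega
      | cons a t =>
          have : order.getD (i + 1) 0 = a := by
            rw [hsplit, ← hplen]
            rw [List.getD_eq_getElem?_getD]
            rw [List.getElem?_append_right (by omega)]
            simp
          rw [this] at hvv; rw [hvv]; exact List.mem_cons_self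
    · intro hmem
      cases suf with
      | nil => simp at hmem
      | cons a t =>
          have hva : v ≤ a := hvle a List.mem_cons_self
          have hav : a ≤ v := by
            rcases List.mem_cons.mp hmem with rfl | hmem'
            · exact le_refl _
            · rw [List.pairwise_cons] at hpwsuf
              exact hpwsuf.1 v hmem'
          refine ⟨by rw [hlen]; simp; omega, ?_⟩
          rw [hget, hsplit, ← hplen, List.getD_eq_getElem?_getD,
            List.getElem?_append_right (by omega)]
          simp
          omega
  by_cases hd : v ∈ suf
  · -- both take the duplicate branch
    rw [if_pos (hdup.mpr hd), if_pos (by rw [PySem.List.count_eq] at hcnt ⊢; have := List.count_pos_iff.mpr hd; omega)]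
  · rw [if_neg (fun h => hd (hdup.mp h)),
      if_neg (by rw [hcnt]; have : suf.count v = 0 := List.count_eq_zero_of_not_mem hd; omega)]
    -- unique occurrence: rank position ↔ max/min characterisations
    have hmaxiff : (v = (PySem.List.max? stats (fun y => y)).getD 0) ↔ i = order.length - 1 := by
      rw [pv_max_getD_eq hvmem]
      constructor
      · intro hall
        cases suf with
        | nil => simp at hlen; omega
        | cons a t =>
            exfalso
            have ha : a ∈ stats := hperm.mem_iff.mp (by rw [hsplit]; simp)
            have h1 : v ≤ a := hvle a List.mem_cons_self
            have h2 : a ≤ v := hall a ha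
            exact hd (by rw [le_antisymm h1 h2]; exact List.mem_cons_self)
      · intro hitop s hs
        have hsuf : suf = [] := by
          cases suf with | nil => rfl | cons a t => simp at hlen; omega
        subst hsuf
        rcases (hperm.mem_iff.mpr hs) with hmem
        rw [hsplit] at hmem
        rcases List.mem_append.mp hmem with hp | hv'
        · exact le_of_lt (lt_of_le_of_ne (hcross s hp v List.mem_cons_self) (fun h => hvpre (h ▸ hp)))
        · simp at hv'; omega
    have hminiff : (v = (PySem.List.min? stats (fun y => y)).getD 0) ↔ i = 0 := by
      rw [pv_min_getD_eq hvmem]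
      constructor
      · intro hall
        cases pre with
        | nil => simp at hplen; omega
        | cons a t =>
            exfalso
            have ha : a ∈ stats := hperm.mem_iff.mp (by rw [hsplit]; simp)
            have h1 : a ≤ v := hcross a List.mem_cons_self v List.mem_cons_self
            have h2 : v ≤ a := hall a ha
            exact hvpre (by rw [le_antisymm h2 h1]; exact List.mem_cons_self)
      · intro hibot s hs
        have hpre0 : pre = [] := by cases pre with | nil => rfl | cons a t => simp at hplen; omega
        subst hpre0
        rcases (hperm.mem_iff.mpr hs) with hmem
        rw [hsplit] at hmem
        simp at hmem
        rcases hmem with rfl | hmem'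
        · exact le_refl _
        · exact hvle s hmem'
    have hlenord : order.length = stats.length := by rw [hperm.length_eq]
    -- v cannot be both first and last in a sorted list of length ≥ 2 with a unique occurrence
    have hnotboth : ¬ (i = order.length - 1 ∧ i = 0) := by
      rintro ⟨h1, h2⟩
      have hsuf : suf = [] := by
        cases suf with | nil => rfl | cons a t => simp at hlen; omega
      have hpre0 : pre = [] := by cases pre with | nil => rfl | cons a t => simp at hplen; omega
      rw [hsplit, hsuf, hpre0] at hlenord
      simp at hlenord; omega
    by_cases hmx : v = (PySem.List.max? stats (fun y => y)).getD 0
    · rw [if_pos hmx, if_pos (hmaxiff.mp hmx)]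
    · rw [if_neg hmx, if_neg (fun h => hmx (hmaxiff.mpr h))]
      by_cases hmn : v = (PySem.List.min? stats (fun y => y)).getD 0
      · rw [if_neg (by tauto), if_pos (hminiff.mp hmn)]
      · rw [if_pos ⟨hmx, hmn⟩, if_neg (fun h => hmn (hminiff.mpr h))]

-- ===== VERDICT (by name: the statement is the Claim_ definition above) =====
theorem compare_stat_spec : Claim_equal_compare_stat := by
  intro stats index _ hpre
  exact compare_stat_eq_alt stats index hpre
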